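-- pv_equiv track=rewrite | github.com/DarkBenky/CrapyLLM | parsePython.py | get_python_functions
-- ===== SOURCE A (Python) =====
-- def get_python_functions(text):
--     functions = []
--     lines = text.split('\n')
--     for i, line in enumerate(lines):
--         if line.strip().startswith("def "):
--             function = line.strip()
--             j = i + 1
--             while j < len(lines) and not lines[j].strip().startswith("def "):
--                 function += "\n" + lines[j]
--                 j += 1
--             functions.append(function)
--     return functions
-- ===== SOURCE B (Python) =====
-- def get_python_functions(text):
--     functions = []
--     current = None
--     for line in text.split('\n'):
--         if line.strip().startswith("def "):
--             if current is not None: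
--                 functions.append("\n".join(current))
--             current = [line.strip()]
--         elif current is not None:
--             current.append(line)
--     if current is not None:
--         functions.append("\n".join(current))
--     return functions
-- ===== Notes on version B (the rewrite author's own statement) =====
-- stated objective: simpler
-- what changed: Replaces the outer-for with an inner rescanning while-loop and repeated string concatenation by a single linear pass keeping one open block list, flushed on each new def-header line and joined once at the end.
import Mathlib
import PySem

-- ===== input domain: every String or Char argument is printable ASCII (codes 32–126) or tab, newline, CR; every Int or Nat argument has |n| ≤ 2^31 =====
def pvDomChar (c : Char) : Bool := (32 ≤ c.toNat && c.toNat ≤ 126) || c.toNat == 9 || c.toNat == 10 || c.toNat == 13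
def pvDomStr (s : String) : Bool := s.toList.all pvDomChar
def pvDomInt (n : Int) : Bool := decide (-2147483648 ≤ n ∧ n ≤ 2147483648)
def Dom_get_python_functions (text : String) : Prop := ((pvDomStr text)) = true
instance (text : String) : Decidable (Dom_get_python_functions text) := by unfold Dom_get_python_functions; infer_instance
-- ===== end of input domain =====

-- B replaces A's outer-for with inner rescanning while and repeated string concatenation
-- by a single linear pass keeping one open block list, joined once when the block closes (simpler).

-- shared by both ports: the test `line.strip().startswith("def ")`
def pvIsDef (l : String) : Bool := PySem.Str.startswith (PySem.Str.strip l) "def "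

-- ===== PORT A =====
-- inner `while j < len(lines) and not lines[j].strip().startswith("def "): function += "\n" + lines[j]`
def pvCollectA : List String → String → String
  | [], fn => fn
  | l :: ls, fn => if pvIsDef l then fn else pvCollectA ls (fn ++ "\n" ++ l)

-- outer `for i, line in enumerate(lines)` (the suffix ls is lines[i+1:], read by the inner while)
def pvLoopA : List String → List String → List String
  | [], acc => acc
  | l :: ls, acc => pvLoopA ls (if pvIsDef l then acc ++ [pvCollectA ls (PySem.Str.strip l)] else acc)

def get_python_functions (text : String) : List String :=
  pvLoopA ((PySem.Str.split? text "\n").getD []) []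

-- ===== PORT B =====
-- state: (functions, current); current = none until the first 'def ' line
def pvStepB (s : List String × Option (List String)) (line : String) :
    List String × Option (List String) :=
  if pvIsDef line then
    (match s.2 with
     | some cur => s.1 ++ [PySem.Str.join "\n" cur]
     | none => s.1,
     some [PySem.Str.strip line])
  else
    match s.2 with
    | some cur => (s.1, some (cur ++ [line]))
    | none => s

def get_python_functions_alt (text : String) : List String :=
  let st := ((PySem.Str.split? text "\n").getD []).foldl pvStepB ([], none)
  match st.2 with
  | some cur => st.1 ++ [PySem.Str.join "\n" cur]
  | none => st.1

-- ===== PRECONDITION & SPEC =====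
def Spec_get_python_functions (text : String) (out : List String) : Prop := out = get_python_functions_alt text
instance (text : String) (out : List String) : Decidable (Spec_get_python_functions text out) := by unfold Spec_get_python_functions; infer_instance

-- ===== CLAIM (what is proved, stated in full; the proofs are below) =====
def Claim_equal_get_python_functions : Prop := ∀ (text : String), Dom_get_python_functions text → Spec_get_python_functions text (get_python_functions text)

-- ===== LEMMAS AND PROOFS =====

-- the blocks both programs produce, as lists of lines (head stripped, rest raw)
def pvBlocks : List String → List (List String)
  | [] => []
  | l :: ls =>
      if pvIsDef l then (PySem.Str.strip l :: ls.takeWhile (fun x => !pvIsDef x)) :: pvBlocks ls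
      else pvBlocks ls

def pvFlush (s : List String × Option (List String)) : List String :=
  match s.2 with
  | some cur => s.1 ++ [PySem.Str.join "\n" cur]
  | none => s.1

theorem pv_foldl_shift (t : List String) (a b : String) :
    t.foldl (fun s x => s ++ "\n" ++ x) (a ++ b) = a ++ t.foldl (fun s x => s ++ "\n" ++ x) b := by
  induction t generalizing b with
  | nil => rfl
  | cons x t ih =>
      simp only [List.foldl_cons]
      have e : a ++ b ++ "\n" ++ x = a ++ (b ++ "\n" ++ x) := by
        simp [String.append_assoc]
      rw [e, ih]

theorem pv_join_cons (fn : String) (t : List String) :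
    PySem.Str.join "\n" (fn :: t) = t.foldl (fun s x => s ++ "\n" ++ x) fn := by
  induction t generalizing fn with
  | nil =>
      apply String.toList_inj.mp
      simp [PySem.Str.toList_join, PySem.Chars.join, List.intercalate]
  | cons x t ih =>
      have h : PySem.Str.join "\n" (fn :: x :: t) = fn ++ "\n" ++ PySem.Str.join "\n" (x :: t) := by
        apply String.toList_inj.mp
        simp [PySem.Str.toList_join, PySem.Chars.join, List.intercalate, String.toList_append]
      rw [h, ih, List.foldl_cons, pv_foldl_shift]

theorem pv_collectA_eq (ls : List String) (fn : String) :
    pvCollectA ls fn = (ls.takeWhile (fun x => !pvIsDef x)).foldl (fun s x => s ++ "\n" ++ x) fn := by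
  induction ls generalizing fn with
  | nil => rfl
  | cons l ls ih =>
      by_cases h : pvIsDef l = true <;> simp [pvCollectA, h, ih]

theorem pv_loopA_eq (ls : List String) (acc : List String) :
    pvLoopA ls acc = acc ++ (pvBlocks ls).map (PySem.Str.join "\n") := by
  induction ls generalizing acc with
  | nil => simp [pvLoopA, pvBlocks]
  | cons l ls ih =>
      by_cases h : pvIsDef l = true
      · simp [pvLoopA, pvBlocks, h, ih, pv_collectA_eq, pv_join_cons]
      · simp [pvLoopA, pvBlocks, h, ih]

theorem pv_blocks_dropWhile (ls : List String) :
    pvBlocks (ls.dropWhile (fun x => !pvIsDef x)) = pvBlocks ls := by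
  induction ls with
  | nil => rfl
  | cons l ls ih =>
      by_cases h : pvIsDef l = true <;> simp [pvBlocks, h, ih]

theorem pv_foldB_some (ls : List String) (funcs : List String) (c : List String) :
    pvFlush (ls.foldl pvStepB (funcs, some c)) =
      funcs ++ [PySem.Str.join "\n" (c ++ ls.takeWhile (fun x => !pvIsDef x))]
        ++ (pvBlocks (ls.dropWhile (fun x => !pvIsDef x))).map (PySem.Str.join "\n") := by
  induction ls generalizing funcs c with
  | nil => simp [pvFlush, pvBlocks]
  | cons l ls ih =>
      by_cases h : pvIsDef l = true
      · rw [List.foldl_cons]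
        rw [show pvStepB (funcs, some c) l
              = (funcs ++ [PySem.Str.join "\n" c], some [PySem.Str.strip l]) by simp [pvStepB, h]]
        rw [ih, pv_blocks_dropWhile]
        simp [pvBlocks, h]
      · rw [List.foldl_cons]
        rw [show pvStepB (funcs, some c) l = (funcs, some (c ++ [l])) by simp [pvStepB, h]]
        rw [ih]
        simp [List.dropWhile_cons, h, List.append_assoc]

theorem pv_foldB_none (ls : List String) (funcs : List String) :
    pvFlush (ls.foldl pvStepB (funcs, none)) =
      funcs ++ (pvBlocks ls).map (PySem.Str.join "\n") := by
  induction ls generalizing funcs with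
  | nil => simp [pvFlush, pvBlocks]
  | cons l ls ih =>
      by_cases h : pvIsDef l = true
      · rw [List.foldl_cons]
        rw [show pvStepB (funcs, none) l = (funcs, some [PySem.Str.strip l]) by simp [pvStepB, h]]
        rw [pv_foldB_some, pv_blocks_dropWhile]
        simp [pvBlocks, h]
      · rw [List.foldl_cons]
        rw [show pvStepB (funcs, none) l = (funcs, none) by simp [pvStepB, h]]
        rw [ih, show pvBlocks (l :: ls) = pvBlocks ls by simp [pvBlocks, h]]

-- ===== VERDICT (by name: the statement is the Claim_ definition above) =====
theorem get_python_functions_spec : Claim_equal_get_python_functions := by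
  intro text _
  show get_python_functions text = get_python_functions_alt text
  unfold get_python_functions get_python_functions_alt
  rw [pv_loopA_eq]
  have := pv_foldB_none ((PySem.Str.split? text "\n").getD []) []
  simp only [pvFlush] at this
  simpa using this.symm
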